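-- pv_equiv track=rewrite | github.com/AlanItzep/fundamentals_of_python | exercise_2.py | adjust_numbers
-- ===== SOURCE A (Python) =====
-- def adjust_numbers(text, delta):
--     new_text = ""
--     skip_until_index = -1
--
--     for i in range(len(text)):
--         if i < skip_until_index:
--             continue
--
--         char = text[i]
--
--         if char.isdigit():
--             # encontramos el inicio del numero
--             current_number_str = ""
--             temp_index = i # se usa j para leer el numero completo sin afectar i todavia
--
--             # leemos todos los digitos consecutivos
--             while temp_index < len(text) and text[temp_index].isdigit():
--                 current_number_str += text[temp_index]
--                 temp_index += 1
--
--             # convertivmos, sumamos delta y añadimos al nuevo texto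
--             original_number = int(current_number_str)
--             adjusted_numbers = original_number + delta
--             new_text += str(adjusted_numbers)
--
--             # Marcamos hasta qué índice debemos saltar en el bucle principal 'for'.
--             # 'j' ya está en el carácter *después* del número.
--             skip_until_index = temp_index
--         else:
--             new_text += char
--
--     return new_text
-- ===== SOURCE B (Python) =====
-- def adjust_numbers(text, delta):
--     # Scan the text RIGHT-TO-LEFT, prepending digits onto a pending run buffer;
--     # a run is flushed (converted and adjusted) when the character to its left
--     # is not a digit, and the output pieces are assembled back-to-front.
--     pieces = []
--     run = ""
--     for ch in reversed(text):
--         if ch.isdigit():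
--             run = ch + run
--         else:
--             if run:
--                 pieces.append(str(int(run) + delta))
--                 run = ""
--             pieces.append(ch)
--     if run:
--         pieces.append(str(int(run) + delta))
--     return ''.join(reversed(pieces))
-- ===== Notes on version B (the rewrite author's own statement) =====
-- stated objective: alternative
-- what changed: Replaces A's forward index loop with inner while and skip_until_index bookkeeping by a single right-to-left scan that prepends digits onto a pending run buffer, flushes a run when the character to its left is a non-digit, and assembles the output pieces back-to-front.
import Mathlib
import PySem

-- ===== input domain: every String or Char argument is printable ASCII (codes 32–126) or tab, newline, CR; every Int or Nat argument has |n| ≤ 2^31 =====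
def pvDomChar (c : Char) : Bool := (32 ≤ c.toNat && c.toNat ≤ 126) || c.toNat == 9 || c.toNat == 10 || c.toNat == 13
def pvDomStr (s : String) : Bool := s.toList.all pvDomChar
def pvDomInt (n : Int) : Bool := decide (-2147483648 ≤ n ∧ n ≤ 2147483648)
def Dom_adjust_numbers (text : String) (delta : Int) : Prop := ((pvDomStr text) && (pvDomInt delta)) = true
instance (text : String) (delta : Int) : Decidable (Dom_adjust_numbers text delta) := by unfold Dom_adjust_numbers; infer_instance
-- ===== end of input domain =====

-- B replaces A's forward index loop (inner while + skip_until_index bookkeeping) by a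
-- right-to-left scan with a pending digit-run buffer, assembling the output back-to-front
-- (alternative decomposition, same cost).

-- ===== PORT A =====
-- the inner `while temp_index < len(text) and text[temp_index].isdigit()` loop
def adjA_while (cs : List Char) (tempIndex : Nat) (acc : List Char) : List Char × Nat :=
  if _h : tempIndex < cs.length ∧ PySem.Chars.isdigit cs[tempIndex]! then
    adjA_while cs (tempIndex + 1) (acc ++ [cs[tempIndex]!])
  else
    (acc, tempIndex)
termination_by cs.length - tempIndex

-- the `for i in range(len(text))` loop, state = (new_text, skip_until_index)
def adjA_loop (cs : List Char) (delta : Int) (i : Nat) (newText : List Char) (skip : Int) :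
    List Char :=
  if _h : i < cs.length then
    if (i : Int) < skip then
      adjA_loop cs delta (i + 1) newText skip
    else
      let c := cs[i]!
      if PySem.Chars.isdigit c then
        let p := adjA_while cs i []
        -- int(current_number_str): never None here (nonempty ASCII-digit run); getD 0 is unreachable
        let original := (PySem.Int.ofChars? p.1).getD 0
        let adjusted := original + delta
        adjA_loop cs delta (i + 1) (newText ++ PySem.Int.toChars adjusted) (p.2 : Int)
      else
        adjA_loop cs delta (i + 1) (newText ++ [c]) skip
  else
    newText
termination_by cs.length - i

def adjust_numbers (text : String) (delta : Int) : String :=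
  String.ofList (adjA_loop text.toList delta 0 [] (-1))

-- ===== PORT B =====
-- one step of `for ch in reversed(text)`, state = (pieces, run)
def adjB_step (delta : Int) (st : List (List Char) × List Char) (c : Char) :
    List (List Char) × List Char :=
  if PySem.Chars.isdigit c then
    (st.1, c :: st.2)           -- run = ch + run
  else if st.2 ≠ [] then
    -- int(run): never None here (nonempty ASCII-digit run); getD 0 is unreachable
    ((st.1 ++ [PySem.Int.toChars ((PySem.Int.ofChars? st.2).getD 0 + delta)]) ++ [[c]], [])
  else
    (st.1 ++ [[c]], [])

def adjust_numbers_alt (text : String) (delta : Int) : String :=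
  let st := text.toList.reverse.foldl (adjB_step delta) ([], [])
  let pieces :=
    if st.2 ≠ [] then st.1 ++ [PySem.Int.toChars ((PySem.Int.ofChars? st.2).getD 0 + delta)]
    else st.1
  String.ofList pieces.reverse.flatten

-- ===== PRECONDITION & SPEC =====
def Spec_adjust_numbers (text : String) (delta : Int) (out : String) : Prop := out = adjust_numbers_alt text delta
instance (text : String) (delta : Int) (out : String) : Decidable (Spec_adjust_numbers text delta out) := by unfold Spec_adjust_numbers; infer_instance

-- ===== CLAIM (what is proved, stated in full; the proofs are below) =====
def Claim_equal_adjust_numbers : Prop := ∀ (text : String) (delta : Int), Dom_adjust_numbers text delta → Spec_adjust_numbers text delta (adjust_numbers text delta)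

-- ===== LEMMAS AND PROOFS =====

-- proof-only normal form: the text partitioned into maximal digit/non-digit runs,
-- each run mapped (digit runs adjusted, others kept)
def pvGroupBy (key : Char → Bool) : List Char → List (Bool × List Char)
  | [] => []
  | c :: t =>
      let k := key c
      (k, c :: t.takeWhile (fun x => key x == k)) ::
        pvGroupBy key (t.dropWhile (fun x => key x == k))
termination_by cs => cs.length
decreasing_by simpa using Nat.lt_succ_of_le (List.length_dropWhile_le _ _)

def pvPiece (delta : Int) (p : Bool × List Char) : List Char :=
  if p.1 then PySem.Int.toChars ((PySem.Int.ofChars? p.2).getD 0 + delta) else p.2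

def pvG (delta : Int) (ds : List Char) : List Char :=
  ((pvGroupBy PySem.Chars.isdigit ds).map (pvPiece delta)).flatten

theorem pv_dropWhile_eq (p : Char → Bool) (l : List Char) :
    l.dropWhile p = l.drop (l.takeWhile p).length := by
  induction l with
  | nil => simp
  | cons a t ih => by_cases h : p a <;> simp [List.takeWhile, List.dropWhile, h, ih]

theorem pv_while_spec (cs : List Char) :
    ∀ i acc, adjA_while cs i acc =
      (acc ++ (cs.drop i).takeWhile PySem.Chars.isdigit,
       i + ((cs.drop i).takeWhile PySem.Chars.isdigit).length) := by
  intro i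
  induction hm : cs.length - i using Nat.strong_induction_on generalizing i with
  | _ m ih =>
    intro acc
    rw [adjA_while]
    by_cases hi : i < cs.length
    · have hdrop : cs.drop i = cs[i] :: cs.drop (i + 1) := List.drop_eq_getElem_cons hi
      have hbang : cs[i]! = cs[i] := getElem!_pos cs i hi
      by_cases hd : PySem.Chars.isdigit cs[i]
      · have htw : (cs.drop i).takeWhile PySem.Chars.isdigit
            = cs[i] :: (cs.drop (i + 1)).takeWhile PySem.Chars.isdigit := by
          rw [hdrop, List.takeWhile_cons, if_pos hd]
        rw [dif_pos ⟨hi, by rw [hbang]; exact hd⟩]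
        rw [ih (cs.length - (i + 1)) (by omega) (i + 1) rfl]
        rw [htw, hbang]
        simp
        omega
      · have htw : (cs.drop i).takeWhile PySem.Chars.isdigit = [] := by
          rw [hdrop, List.takeWhile_cons, if_neg (by simp [hd])]
        rw [dif_neg (by rw [hbang]; simp [hd])]
        rw [htw]
        simp
    · rw [dif_neg (by simp [hi])]
      simp [List.drop_eq_nil_of_le (by omega : cs.length ≤ i)]

theorem pv_skip_spec (cs : List Char) (delta : Int) (t : Nat) (ht : t ≤ cs.length) :
    ∀ j acc, j ≤ t → adjA_loop cs delta j acc (t : Int) = adjA_loop cs delta t acc (t : Int) := by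
  intro j
  induction hm : t - j using Nat.strong_induction_on generalizing j with
  | _ m ih =>
    intro acc hj
    rcases Nat.eq_or_lt_of_le hj with h | h
    · rw [h]
    · rw [adjA_loop, dif_pos (by omega), if_pos (by exact_mod_cast h)]
      exact ih (t - (j + 1)) (by omega) (j + 1) rfl acc (by omega)

theorem pvG_cons_nondigit (delta : Int) (c : Char) (t : List Char)
    (hc : PySem.Chars.isdigit c = false) : pvG delta (c :: t) = c :: pvG delta t := by
  cases t with
  | nil => simp [pvG, pvGroupBy, pvPiece, hc]
  | cons d t' =>
    by_cases hd : PySem.Chars.isdigit d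
    · simp [pvG, pvGroupBy, pvPiece, hc, hd, List.takeWhile, List.dropWhile]
    · simp [pvG, pvGroupBy, pvPiece, hc, hd, List.takeWhile, List.dropWhile]

theorem pvGroupBy_cons (key : Char → Bool) (c : Char) (t : List Char) :
    pvGroupBy key (c :: t) =
      (key c, c :: t.takeWhile (fun x => key x == key c)) ::
        pvGroupBy key (t.dropWhile (fun x => key x == key c)) := by
  rw [pvGroupBy]

-- A = pvG: the main loop produces exactly the run-normal-form output
theorem pv_main (cs : List Char) (delta : Int) :
    ∀ (i : Nat) (acc : List Char) (skip : Int), skip ≤ (i : Int) →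
      adjA_loop cs delta i acc skip = acc ++ pvG delta (cs.drop i) := by
  intro i
  induction hm : cs.length - i using Nat.strong_induction_on generalizing i with
  | _ m ih =>
    intro acc skip hskip
    rw [adjA_loop]
    by_cases hi : i < cs.length
    · rw [dif_pos hi, if_neg (by omega)]
      have hdrop : cs.drop i = cs[i] :: cs.drop (i + 1) := List.drop_eq_getElem_cons hi
      have hbang : cs[i]! = cs[i] := getElem!_pos cs i hi
      by_cases hd : PySem.Chars.isdigit cs[i]
      · rw [if_pos (by rw [hbang]; exact hd)]
        rw [pv_while_spec]
        have htw : (cs.drop i).takeWhile PySem.Chars.isdigit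
            = cs[i] :: (cs.drop (i + 1)).takeWhile PySem.Chars.isdigit := by
          rw [hdrop, List.takeWhile_cons, if_pos hd]
        set n := ((cs.drop (i + 1)).takeWhile PySem.Chars.isdigit).length with hn
        have hlen : ((cs.drop i).takeWhile PySem.Chars.isdigit).length = n + 1 := by
          rw [htw, List.length_cons, hn]
        have hnlen : i + 1 + n ≤ cs.length := by
          have h1 := (List.takeWhile_sublist (p := PySem.Chars.isdigit)
            (l := cs.drop (i + 1))).length_le
          simp only [List.length_drop] at h1
          omega
        rw [hlen]
        have hstep : i + (n + 1) = i + 1 + n := by omega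
        rw [hstep]
        rw [pv_skip_spec cs delta (i + 1 + n) hnlen (i + 1) _ (by omega)]
        rw [ih (cs.length - (i + 1 + n)) (by omega) (i + 1 + n) rfl _ _ (le_refl _)]
        have hrest : (cs.drop (i + 1)).dropWhile PySem.Chars.isdigit = cs.drop (i + 1 + n) := by
          rw [pv_dropWhile_eq, List.drop_drop, ← hn]
        have hgb : pvG delta (cs.drop i)
            = PySem.Int.toChars
                ((PySem.Int.ofChars? ((cs.drop i).takeWhile PySem.Chars.isdigit)).getD 0 + delta)
              ++ pvG delta (cs.drop (i + 1 + n)) := by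
          have hfun : (fun x => PySem.Chars.isdigit x == true) = PySem.Chars.isdigit := by
            funext x; cases PySem.Chars.isdigit x <;> simp
          rw [hdrop]
          simp only [pvG, pvGroupBy_cons, hd, hfun, hrest, List.map_cons,
            List.flatten_cons, pvPiece, List.takeWhile_cons, if_true]
        rw [hgb, List.append_assoc]
        simp
      · rw [if_neg (by rw [hbang]; simp [hd])]
        rw [ih (cs.length - (i + 1)) (by omega) (i + 1) rfl _ skip (by push_cast; omega)]
        rw [hdrop, pvG_cons_nondigit delta _ _ (by simpa using hd), hbang]
        simp
    · rw [dif_neg hi]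
      simp [List.drop_eq_nil_of_le (by omega : cs.length ≤ i), pvG, pvGroupBy]

def pvFin (delta : Int) (st : List (List Char) × List Char) : List (List Char) :=
  if st.2 ≠ [] then st.1 ++ [PySem.Int.toChars ((PySem.Int.ofChars? st.2).getD 0 + delta)]
  else st.1

-- pvG on a pure digit run is one adjusted number
theorem pvG_digits (delta : Int) (run : List Char) (hne : run ≠ [])
    (hd : run.all PySem.Chars.isdigit) :
    pvG delta run = PySem.Int.toChars ((PySem.Int.ofChars? run).getD 0 + delta) := by
  cases run with
  | nil => exact absurd rfl hne
  | cons d t =>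
    simp only [List.all_cons, Bool.and_eq_true] at hd
    have htw : t.takeWhile PySem.Chars.isdigit = t :=
      List.takeWhile_eq_self_iff.mpr (by intro x hx; exact (List.all_eq_true.mp hd.2) x hx)
    have hdw : t.dropWhile PySem.Chars.isdigit = [] :=
      List.dropWhile_eq_nil_iff.mpr (by intro x hx; exact (List.all_eq_true.mp hd.2) x hx)
    simp [pvG, pvGroupBy_cons, hd.1, htw, hdw, pvGroupBy, pvPiece]

-- leading non-digit characters pass through pvG unchanged
theorem pvG_nondigit_prefix (delta : Int) (t : List Char) :
    pvG delta t
      = t.takeWhile (fun x => PySem.Chars.isdigit x == false)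
        ++ pvG delta (t.dropWhile (fun x => PySem.Chars.isdigit x == false)) := by
  cases t with
  | nil => simp [pvG, pvGroupBy]
  | cons e t' =>
    by_cases he : PySem.Chars.isdigit e
    · simp [he]
    · have he' : PySem.Chars.isdigit e = false := by simpa using he
      simp only [pvG, pvGroupBy_cons, he', List.takeWhile_cons, List.dropWhile_cons,
        List.map_cons, List.flatten_cons, pvPiece]
      simp

-- pvG splits at any non-digit character
theorem pvG_split (delta : Int) (c : Char) (hc : PySem.Chars.isdigit c = false) :
    ∀ (s t : List Char), pvG delta (s ++ c :: t) = pvG delta s ++ c :: pvG delta t := by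
  intro s
  induction hm : s.length using Nat.strong_induction_on generalizing s with
  | _ m ih =>
    intro t
    cases s with
    | nil =>
      have hpre := pvG_nondigit_prefix delta t
      simp only [pvG] at hpre
      simp [pvG, pvGroupBy, pvPiece, hc, hpre]
    | cons d s' =>
      by_cases hdd : PySem.Chars.isdigit d
      · -- head group is a digit run; it cannot cross the non-digit c
        have hcp : (PySem.Chars.isdigit c == true) = false := by simp [hc]
        by_cases hfull : (s'.takeWhile (fun x => PySem.Chars.isdigit x == true)).length = s'.length
        · have htw : s'.takeWhile (fun x => PySem.Chars.isdigit x == true) = s' :=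
            (List.takeWhile_sublist _).eq_of_length hfull
          have hdw : s'.dropWhile (fun x => PySem.Chars.isdigit x == true) = [] := by
            rw [pv_dropWhile_eq, hfull, List.drop_length]
          simp only [List.cons_append, pvG, pvGroupBy_cons, hdd, List.takeWhile_append, htw,
            if_pos, List.takeWhile_cons, hcp, List.dropWhile_append, hdw,
            List.isEmpty_nil, List.dropWhile_cons, List.map_cons, List.flatten_cons]
          have hpre := pvG_nondigit_prefix delta t
          simp only [pvG] at hpre
          simp [pvGroupBy, pvPiece, hc, hpre]
        · have hdwne : s'.dropWhile (fun x => PySem.Chars.isdigit x == true) ≠ [] := by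
            rw [pv_dropWhile_eq]
            have hle := (List.takeWhile_sublist
              (p := fun x => PySem.Chars.isdigit x == true) (l := s')).length_le
            intro hnil
            rw [List.drop_eq_nil_iff] at hnil
            omega
          have hlt : (s'.dropWhile (fun x => PySem.Chars.isdigit x == true)).length < m := by
            rw [← hm]
            have := List.length_dropWhile_le (fun x => PySem.Chars.isdigit x == true) s'
            simp only [List.length_cons]
            omega
          simp only [List.cons_append, pvG, pvGroupBy_cons, hdd, List.takeWhile_append,
            hfull, if_false, List.dropWhile_append, List.isEmpty_iff, hdwne,
            List.map_cons, List.flatten_cons]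
          have h3 := ih _ hlt (s'.dropWhile (fun x => PySem.Chars.isdigit x == true)) rfl t
          simp only [pvG] at h3
          rw [h3]
          simp
      · -- head group is a non-digit run; c may join it, the piece is the identity either way
        have hdd' : PySem.Chars.isdigit d = false := by simpa using hdd
        have hcp : (PySem.Chars.isdigit c == false) = true := by simp [hc]
        by_cases hfull : (s'.takeWhile (fun x => PySem.Chars.isdigit x == false)).length = s'.length
        · have htw : s'.takeWhile (fun x => PySem.Chars.isdigit x == false) = s' :=
            (List.takeWhile_sublist _).eq_of_length hfull
          have hdw : s'.dropWhile (fun x => PySem.Chars.isdigit x == false) = [] := by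
            rw [pv_dropWhile_eq, hfull, List.drop_length]
          simp only [List.cons_append, pvG, pvGroupBy_cons, hdd', List.takeWhile_append, htw,
            if_pos, List.takeWhile_cons, hcp, List.dropWhile_append, hdw,
            List.isEmpty_nil, List.dropWhile_cons, List.map_cons, List.flatten_cons, pvPiece]
          have hpre := pvG_nondigit_prefix delta t
          simp only [pvG] at hpre
          simp [pvGroupBy, hpre]
        · have hdwne : s'.dropWhile (fun x => PySem.Chars.isdigit x == false) ≠ [] := by
            rw [pv_dropWhile_eq]
            have hle := (List.takeWhile_sublist
              (p := fun x => PySem.Chars.isdigit x == false) (l := s')).length_le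
            intro hnil
            rw [List.drop_eq_nil_iff] at hnil
            omega
          have hlt : (s'.dropWhile (fun x => PySem.Chars.isdigit x == false)).length < m := by
            rw [← hm]
            have := List.length_dropWhile_le (fun x => PySem.Chars.isdigit x == false) s'
            simp only [List.length_cons]
            omega
          simp only [List.cons_append, pvG, pvGroupBy_cons, hdd', List.takeWhile_append,
            hfull, if_false, List.dropWhile_append, List.isEmpty_iff, hdwne,
            List.map_cons, List.flatten_cons]
          have h3 := ih _ hlt (s'.dropWhile (fun x => PySem.Chars.isdigit x == false)) rfl t
          simp only [pvG] at h3
          rw [h3]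
          simp

-- B's loop invariant: the final output of the reversed fold is pvG of the unread part
theorem pv_B_inv (delta : Int) :
    ∀ (rs : List Char) (ps : List (List Char)) (run : List Char),
      run.all PySem.Chars.isdigit →
      (pvFin delta (rs.foldl (adjB_step delta) (ps, run))).reverse.flatten
      = pvG delta (rs.reverse ++ run) ++ ps.reverse.flatten := by
  intro rs
  induction rs with
  | nil =>
    intro ps run hrun
    by_cases hne : run = []
    · simp [pvFin, hne, pvG, pvGroupBy]
    · simp [pvFin, hne, pvG_digits delta run hne hrun]
  | cons c rs' ih =>
    intro ps run hrun
    rw [List.foldl_cons]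
    by_cases hdig : PySem.Chars.isdigit c
    · rw [show adjB_step delta (ps, run) c = (ps, c :: run) by simp [adjB_step, hdig]]
      rw [ih ps (c :: run) (by simp [hdig, hrun])]
      simp
    · have hdig' : PySem.Chars.isdigit c = false := by simpa using hdig
      by_cases hne : run = []
      · rw [show adjB_step delta (ps, run) c = (ps ++ [[c]], []) by
          simp [adjB_step, hdig', hne]]
        rw [ih (ps ++ [[c]]) [] (by simp)]
        rw [List.reverse_cons, hne]
        simp only [List.append_nil]
        rw [pvG_split delta c hdig' rs'.reverse []]
        simp [pvG, pvGroupBy]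
      · rw [show adjB_step delta (ps, run) c
            = ((ps ++ [PySem.Int.toChars ((PySem.Int.ofChars? run).getD 0 + delta)]) ++ [[c]], [])
          by simp [adjB_step, hdig', hne]]
        rw [ih _ [] (by simp)]
        rw [List.reverse_cons, List.append_assoc rs'.reverse [c] run]
        rw [show ([c] ++ run : List Char) = c :: run from rfl]
        rw [pvG_split delta c hdig' rs'.reverse run]
        simp [pvG_digits delta run hne hrun]

-- ===== VERDICT (by name: the statement is the Claim_ definition above) =====
theorem adjust_numbers_spec : Claim_equal_adjust_numbers := by
  intro text delta _
  unfold Spec_adjust_numbers adjust_numbers adjust_numbers_alt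
  rw [pv_main text.toList delta 0 [] (-1) (by norm_num)]
  have h := pv_B_inv delta text.toList.reverse [] [] (by simp)
  simp only [List.reverse_reverse, List.append_nil] at h
  rw [pvFin] at h
  simp only []
  rw [h]
  simp
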